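-- pv_equiv track=rewrite | github.com/santiagoalaniz/fing_aprendaut | lab2/src/naive_bayes_utils.py | build
-- ===== SOURCE A (Python) =====
-- from collections import Counter, defaultdict
--
-- def build(data, N):
--     F_h = Counter()
--     F_hD = defaultdict(Counter)
--     N=4
--     #['x0', 'x1', 'x2']
--     for sentence in data:
--         F_h.update(sentence) #f-h[x0]++, f-h[x1]++, f-h[x2]++
--
--         for i in range(0, len(sentence)):
--             current_word = sentence[i]
--             previous_words = sentence[max(0, i - N):i]
--
--             for previous_word in previous_words:
--                 F_hD[current_word].update([previous_word])
--
--     V = sum(F_h.values())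
--
--     return V, F_h, F_hD
-- ===== SOURCE B (Python) =====
-- from collections import Counter, defaultdict
--
-- def build(data, N):
--     F_h = Counter()
--     F_hD = defaultdict(Counter)
--     N = 4
--     V = 0
--     for sentence in data:
--         window = []  # the at-most-N words preceding the current one, oldest first
--         for word in sentence:
--             F_h[word] += 1
--             V += 1
--             for previous_word in window:
--                 F_hD[word][previous_word] += 1
--             window.append(word)
--             if len(window) > N:
--                 window.pop(0)
--     return V, F_h, F_hD
-- ===== Notes on version B (the rewrite author's own statement) =====
-- stated objective: alternative
-- what changed: Replaces the per-index loop that re-slices sentence[max(0,i-N):i] at every position with a single pass that maintains a sliding window of the last N words (and accumulates V inline instead of summing F_h.values() at the end).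
import Mathlib
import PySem

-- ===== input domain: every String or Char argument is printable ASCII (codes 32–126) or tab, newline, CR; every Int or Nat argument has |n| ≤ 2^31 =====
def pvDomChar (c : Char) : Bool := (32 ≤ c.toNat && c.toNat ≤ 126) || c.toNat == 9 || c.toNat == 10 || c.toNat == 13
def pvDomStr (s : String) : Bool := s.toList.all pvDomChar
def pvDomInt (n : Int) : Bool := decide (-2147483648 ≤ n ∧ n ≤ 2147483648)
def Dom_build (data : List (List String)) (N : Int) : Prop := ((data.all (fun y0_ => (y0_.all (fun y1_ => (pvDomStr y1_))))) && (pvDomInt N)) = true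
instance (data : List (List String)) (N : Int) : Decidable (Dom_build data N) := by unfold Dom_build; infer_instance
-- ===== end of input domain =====

-- B replaces A's per-index slicing loop by one pass with a sliding window of the last 4 words,
-- accumulating V inline; equal return value on all inputs (the parameter N is ignored by A: it is reassigned to 4).

-- ===== PORT A =====
-- F_hD[current_word].update([previous_word])  (defaultdict(Counter) access + Counter.update of one element)
def pvPairAddA (d : PySem.Dict String (PySem.Dict String Int)) (cur prev : String) :
    PySem.Dict String (PySem.Dict String Int) :=
  d.modify cur PySem.Dict.empty (fun c => c.modify prev 0 (· + 1))

-- one iteration of A's outer 'for sentence in data' loop (state = (F_h, F_hD); N has been reassigned to 4)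
def pvSentA (st : PySem.Dict String Int × PySem.Dict String (PySem.Dict String Int))
    (sentence : List String) :
    PySem.Dict String Int × PySem.Dict String (PySem.Dict String Int) :=
  -- F_h.update(sentence)
  let Fh := sentence.foldl (fun d w => d.modify w 0 (· + 1)) st.1
  -- for i in range(0, len(sentence)): current_word = sentence[i]  — ported via enumerate (exact: i is always in range)
  let FhD := (PySem.List.enumerate sentence).foldl (fun d p =>
      -- previous_words = sentence[max(0, i - N):i]
      (PySem.List.slice sentence (some (max 0 (p.1 - 4))) (some p.1)).foldl
        (fun d prev => pvPairAddA d p.2 prev) d) st.2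
  (Fh, FhD)

def build (data : List (List String)) (N : Int) :
    Int × (List (String × Int)) × (List (String × List (String × Int))) :=
  let st := data.foldl pvSentA (PySem.Dict.empty, PySem.Dict.empty)
  -- V = sum(F_h.values())
  let V := st.1.values.sum
  (V, st.1.items, st.2.items.map (fun p => (p.1, p.2.items)))

-- ===== PORT B =====
-- F_hD[word][previous_word] += 1
def pvPairAddB (d : PySem.Dict String (PySem.Dict String Int)) (cur prev : String) :
    PySem.Dict String (PySem.Dict String Int) :=
  d.modify cur PySem.Dict.empty (fun c => c.modify prev 0 (· + 1))

-- one iteration of B's inner 'for word in sentence' loop; state = (V, F_h, F_hD, window)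
def pvWordB
    (st : Int × PySem.Dict String Int × PySem.Dict String (PySem.Dict String Int) × List String)
    (word : String) :
    Int × PySem.Dict String Int × PySem.Dict String (PySem.Dict String Int) × List String :=
  (st.1 + 1,                                                -- V += 1
   st.2.1.modify word 0 (· + 1),                            -- F_h[word] += 1
   st.2.2.2.foldl (fun d prev => pvPairAddB d word prev) st.2.2.1,  -- for previous_word in window: ...
   -- window.append(word); if len(window) > N: window.pop(0)   (pop(0) = drop the first element)
   let win := st.2.2.2 ++ [word]
   if win.length > 4 then win.drop 1 else win)

def build_alt (data : List (List String)) (N : Int) :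
    Int × (List (String × Int)) × (List (String × List (String × Int))) :=
  let st := data.foldl (fun st sentence =>
      let r := sentence.foldl pvWordB (st.1, st.2.1, st.2.2, ([] : List String))
      (r.1, r.2.1, r.2.2.1)) ((0 : Int), PySem.Dict.empty, PySem.Dict.empty)
  (st.1, st.2.1.items, st.2.2.items.map (fun p => (p.1, p.2.items)))

-- ===== PRECONDITION & SPEC =====
def Spec_build (data : List (List String)) (N : Int) (out : Int × (List (String × Int)) × (List (String × List (String × Int)))) : Prop := out = build_alt data N
instance (data : List (List String)) (N : Int) (out : Int × (List (String × Int)) × (List (String × List (String × Int)))) : Decidable (Spec_build data N out) := by unfold Spec_build; infer_instance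

-- ===== CLAIM (what is proved, stated in full; the proofs are below) =====
def Claim_equal_build : Prop := ∀ (data : List (List String)) (N : Int), Dom_build data N → Spec_build data N (build data N)

-- ===== LEMMAS AND PROOFS =====

-- B's window trimming step
def pvTrim (l : List String) : List String := if l.length > 4 then l.drop 1 else l

-- the last (at most) 4 elements of a list
def pvLast4 (pre : List String) : List String := pre.drop (pre.length - 4)

-- the common shape of both F_hD loops: process the words of the sentence one by one,
-- pairing each with the current window
def pvStep (d : PySem.Dict String (PySem.Dict String Int)) (win : List String) :
    List String → PySem.Dict String (PySem.Dict String Int)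
  | [] => d
  | w :: ws => pvStep (win.foldl (fun d p => pvPairAddB d w p) d) (pvTrim (win ++ [w])) ws

lemma pvLast4_snoc (pre : List String) (w : String) :
    pvLast4 (pre ++ [w]) = pvTrim (pvLast4 pre ++ [w]) := by
  unfold pvLast4 pvTrim
  by_cases h : pre.length ≤ 3
  · have h0 : pre.length - 4 = 0 := by omega
    have h1 : (pre ++ [w]).length - 4 = 0 := by simp; omega
    rw [h0, h1, List.drop_zero, List.drop_zero, if_neg (by simp; omega)]
  · rw [if_pos (by simp only [List.length_append, List.length_drop, List.length_singleton]; omega)]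
    rw [List.drop_append_of_le_length (by simp only [List.length_append, List.length_singleton]; omega)]
    rw [List.drop_append_of_le_length (by simp only [List.length_drop]; omega)]
    rw [List.drop_drop]
    congr 2
    simp; omega

lemma pvB_split (s : List String) (v : Int) (fh : PySem.Dict String Int)
    (fd : PySem.Dict String (PySem.Dict String Int)) (win : List String) :
    s.foldl pvWordB (v, fh, fd, win) =
      (v + s.length,
       s.foldl (fun d w => d.modify w 0 (· + 1)) fh,
       pvStep fd win s,
       s.foldl (fun w x => pvTrim (w ++ [x])) win) := by
  induction s generalizing v fh fd win with
  | nil => simp [pvStep]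
  | cons w ws ih =>
    simp only [List.foldl_cons, pvWordB, pvStep, pvTrim]
    rw [ih]
    refine Prod.ext ?_ rfl
    simp
    omega

lemma pvA_eq_step (suf : List String) (pre : List String)
    (d : PySem.Dict String (PySem.Dict String Int)) :
    (PySem.List.enumerate suf (pre.length : Int)).foldl
      (fun d p =>
        (PySem.List.slice (pre ++ suf) (some (max 0 (p.1 - 4))) (some p.1)).foldl
          (fun d prev => pvPairAddA d p.2 prev) d) d
    = pvStep d (pvLast4 pre) suf := by
  induction suf generalizing pre d with
  | nil => simp [PySem.List.enumerate, pvStep]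
  | cons w ws ih =>
    have hcons : PySem.List.enumerate (w :: ws) (pre.length : Int)
        = ((pre.length : Int), w) :: PySem.List.enumerate ws ((pre.length : Int) + 1) := by
      simp [PySem.List.enumerate]
    rw [hcons, List.foldl_cons]
    have hslice : PySem.List.slice (pre ++ w :: ws)
        (some (max 0 ((pre.length : Int) - 4))) (some (pre.length : Int)) = pvLast4 pre := by
      rw [show max 0 ((pre.length : Int) - 4) = ((pre.length - 4 : Nat) : Int) by omega]
      rw [PySem.List.slice_natCast]
      rw [List.drop_append_of_le_length (by omega)]
      exact List.take_left' (by simp)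
    rw [hslice]
    have hh := ih (pre ++ [w])
      ((pvLast4 pre).foldl (fun d prev => pvPairAddA d w prev) d)
    rw [List.append_assoc, List.singleton_append, pvLast4_snoc] at hh
    simp only [List.length_append, List.length_singleton, Nat.cast_add, Nat.cast_one] at hh
    rw [pvStep]
    simpa [pvPairAddA, pvPairAddB] using hh

lemma pvSum_bump (d : PySem.Dict String Int) (w : String) (h : d.keys.Nodup) :
    (d.modify w 0 (· + 1)).values.sum = d.values.sum + 1 := by
  have hmod : d.modify w 0 (· + 1) = d.insert w (d.getD w 0 + 1) := rfl
  rw [hmod]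
  cases hc : d.contains w with
  | false =>
    simp [PySem.Dict.values, PySem.Dict.getD_of_not_contains d 0 hc,
      PySem.Dict.items_insert_of_not_contains d (1 : Int) hc]
  | true =>
    have hnd' : (d.insert w (d.getD w 0 + 1)).keys.Nodup := PySem.Dict.nodup_keys_insert d _ _ h
    rw [PySem.Dict.values_eq_map_keys _ hnd' 0, PySem.Dict.values_eq_map_keys _ h 0,
        PySem.Dict.keys_insert_of_contains d _ hc]
    have hw : w ∈ d.keys := by
      rw [← PySem.Dict.contains_iff_mem_keys]; exact hc
    obtain ⟨l1, l2, hk⟩ := List.append_of_mem hw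
    rw [hk] at h ⊢
    simp only [List.nodup_append, List.nodup_cons] at h
    have hnw1 : w ∉ l1 := fun hm => by have := h.2.2 w hm; simp at this
    have hnw2 : w ∉ l2 := h.2.1.1
    simp only [List.map_append, List.map_cons, List.sum_append, List.sum_cons]
    rw [List.map_congr_left (g := fun k => d.getD k 0) (fun k hk1 => by
          rw [PySem.Dict.getD_insert, if_neg (by rintro rfl; exact hnw1 hk1)])]
    rw [List.map_congr_left (l := l2) (g := fun k => d.getD k 0) (fun k hk2 => by
          rw [PySem.Dict.getD_insert, if_neg (by rintro rfl; exact hnw2 hk2)])]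
    rw [PySem.Dict.getD_insert, if_pos rfl]
    ring

lemma pvCnt_sum (s : List String) (fh : PySem.Dict String Int) (h : fh.keys.Nodup) :
    (s.foldl (fun d w => d.modify w 0 (· + 1)) fh).values.sum = fh.values.sum + s.length := by
  induction s generalizing fh with
  | nil => simp
  | cons w ws ih =>
    rw [List.foldl_cons,
        ih _ (by rw [PySem.Dict.keys_modify]; exact PySem.Dict.nodup_keys_insert fh _ _ h),
        pvSum_bump fh w h, List.length_cons]
    push_cast; ring

lemma pvCnt_nodup (s : List String) (fh : PySem.Dict String Int) (h : fh.keys.Nodup) :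
    (s.foldl (fun d w => d.modify w 0 (· + 1)) fh).keys.Nodup :=
  PySem.Dict.nodup_keys_foldl_modify_key s (fun w => w) 0 (fun _ _ => (· + 1)) fh h

lemma pvMain (data : List (List String)) (fh : PySem.Dict String Int)
    (fd : PySem.Dict String (PySem.Dict String Int)) (v : Int)
    (h : fh.keys.Nodup) (hv : v = fh.values.sum) :
    data.foldl (fun st sentence =>
        let r := sentence.foldl pvWordB (st.1, st.2.1, st.2.2, ([] : List String))
        (r.1, r.2.1, r.2.2.1)) (v, fh, fd)
      = ((data.foldl pvSentA (fh, fd)).1.values.sum,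
         (data.foldl pvSentA (fh, fd)).1,
         (data.foldl pvSentA (fh, fd)).2) := by
  induction data generalizing fh fd v with
  | nil => simp [hv]
  | cons s rest ih =>
    rw [List.foldl_cons, List.foldl_cons]
    have hb := pvB_split s v fh fd []
    have ha : pvSentA (fh, fd) s =
        (s.foldl (fun d w => d.modify w 0 (· + 1)) fh, pvStep fd [] s) := by
      simp only [pvSentA]
      refine Prod.ext rfl ?_
      simpa [pvLast4] using pvA_eq_step s [] fd
    simp only [hb, ha]
    exact ih _ _ _ (pvCnt_nodup s fh h) (by rw [pvCnt_sum s fh h, hv])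

-- ===== VERDICT (by name: the statement is the Claim_ definition above) =====
theorem build_spec : Claim_equal_build := by
  intro data N _
  unfold Spec_build build build_alt
  rw [pvMain data PySem.Dict.empty PySem.Dict.empty 0 (by simp [PySem.Dict.keys_empty]) (by simp [PySem.Dict.values, PySem.Dict.empty])]
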